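-- pv_equiv track=rewrite | github.com/Karna-Balaji-07/DSA_Sheet | Binary Search/436. Find Right Interval.py | solution
-- ===== SOURCE A (Python) =====
-- def solution(arr):
--     starts = [(arrs[0],i) for i,arrs in enumerate(arr)]
--     starts.sort()
--     res = []
--     for interval in arr:
--         end = interval[1]
--         left = 0
--         right = len(starts)-1
--         index = -1
--         while left <= right:
--             mid = (left+right)//2
--             if starts[mid][0] >= end:
--                 index = starts[mid][1]
--                 right = mid-1
--             else:
--                 left = mid+1
--         res.append(index)
--     return res
-- ===== SOURCE B (Python) =====
-- def solution(arr):
--     n = len(arr)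
--     starts = sorted((l[0], i) for i, l in enumerate(arr))
--     ends = sorted((l[1], i) for i, l in enumerate(arr))
--     res = [-1] * n
--     p = 0
--     for e, qi in ends:
--         while p < n and starts[p][0] < e:
--             p += 1
--         if p < n:
--             res[qi] = starts[p][1]
--     return res
-- ===== Notes on version B (the rewrite author's own statement) =====
-- stated objective: alternative
-- what changed: Replaces A's per-interval binary search over the sorted (start,index) list by a single monotone two-pointer sweep: the end-points are also sorted and processed in ascending order, so one pointer pass over the sorted starts answers all queries, with results placed back by original index.
import Mathlib
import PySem

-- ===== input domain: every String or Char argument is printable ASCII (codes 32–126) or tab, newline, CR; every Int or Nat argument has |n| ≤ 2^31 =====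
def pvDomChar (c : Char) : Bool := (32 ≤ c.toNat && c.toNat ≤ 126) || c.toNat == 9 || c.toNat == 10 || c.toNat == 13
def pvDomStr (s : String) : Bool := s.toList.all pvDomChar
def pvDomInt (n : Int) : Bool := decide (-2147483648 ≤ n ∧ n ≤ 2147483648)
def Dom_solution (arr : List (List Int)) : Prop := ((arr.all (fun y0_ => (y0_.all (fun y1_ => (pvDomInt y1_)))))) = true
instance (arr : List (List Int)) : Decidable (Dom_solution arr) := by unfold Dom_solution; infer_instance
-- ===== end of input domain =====

-- B replaces A's per-interval binary search over the sorted starts by a single two-pointer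
-- sweep over the end points taken in sorted order (objective: alternative algorithm).

-- ===== PORT A =====
-- the while-loop of A: state (left, right, index); starts[mid] is provably in range on A's calls
def bsearchA (S : List (Int × Int)) (e : Int) (left right index : Int) : Int :=
  if h : left ≤ right then
    let mid := PySem.Int.floordiv (left + right) 2
    let pr := PySem.List.pyGetD S mid (0, 0)
    if e ≤ pr.1 then bsearchA S e left (mid - 1) pr.2
    else bsearchA S e (mid + 1) right index
  else index
termination_by (right + 1 - left).toNat
decreasing_by
  · have hb := PySem.Int.floordiv_two_mid_bounds h; omega
  · have hb := PySem.Int.floordiv_two_mid_bounds h; omega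

def solution (arr : List (List Int)) : List Int :=
  let starts := PySem.List.sorted2
      (arr.zipIdx.map (fun p => (PySem.List.pyGetD p.1 0 0, (p.2 : Int)))) (·.1) (·.2)
  arr.foldl (fun res interval =>
      res ++ [bsearchA starts (PySem.List.pyGetD interval 1 0) 0 ((starts.length : Int) - 1) (-1)]) []

-- ===== PORT B =====
-- the inner while-loop of B: advance the pointer while starts[p][0] < e
def advanceB (S : List (Int × Int)) (e : Int) (p : Nat) : Nat :=
  if h : p < S.length then
    if (S[p]).1 < e then advanceB S e (p + 1) else p
  else p
termination_by S.length - p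

def solution_alt (arr : List (List Int)) : List Int :=
  let n := arr.length
  let starts := PySem.List.sorted2
      (arr.zipIdx.map (fun p => (PySem.List.pyGetD p.1 0 0, (p.2 : Int)))) (·.1) (·.2)
  let ends := PySem.List.sorted2
      (arr.zipIdx.map (fun p => (PySem.List.pyGetD p.1 1 0, (p.2 : Int)))) (·.1) (·.2)
  (ends.foldl (fun st pr =>
      let p := advanceB starts pr.1 st.1
      if h : p < starts.length then (p, st.2.set pr.2.toNat (starts[p]).2) else (p, st.2))
    ((0 : Nat), List.replicate n (-1 : Int))).2

-- ===== PRECONDITION & SPEC =====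
-- Pre_ excludes exactly the inputs where Python A raises IndexError: a sublist with fewer than 2 elements.
def Pre_solution (arr : List (List Int)) : Prop := ∀ l ∈ arr, 2 ≤ l.length
instance (arr : List (List Int)) : Decidable (Pre_solution arr) := by unfold Pre_solution; infer_instance
def pvWitness_solution : List (List Int) := [[1, 2], [2, 3], [0, 5]]

def Spec_solution (arr : List (List Int)) (out : List Int) : Prop := out = solution_alt arr
instance (arr : List (List Int)) (out : List Int) : Decidable (Spec_solution arr out) := by unfold Spec_solution; infer_instance

-- ===== CLAIM (what is proved, stated in full; the proofs are below) =====
def Claim_equal_solution : Prop := ∀ (arr : List (List Int)), Dom_solution arr → Pre_solution arr → Spec_solution arr (solution arr)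

-- ===== LEMMAS AND PROOFS =====

-- the sorted (start, index) list, named for the proofs
def startsOf (arr : List (List Int)) : List (Int × Int) :=
  PySem.List.sorted2 (arr.zipIdx.map (fun p => (PySem.List.pyGetD p.1 0 0, (p.2 : Int)))) (·.1) (·.2)

def endsOf (arr : List (List Int)) : List (Int × Int) :=
  PySem.List.sorted2 (arr.zipIdx.map (fun p => (PySem.List.pyGetD p.1 1 0, (p.2 : Int)))) (·.1) (·.2)

-- K S e = index of the first element of S with fst ≥ e (S.length if none)
def K (S : List (Int × Int)) (e : Int) : Nat := S.findIdx (fun pr => e ≤ pr.1)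

-- the common answer: snd of that element, or -1
def fval (S : List (Int × Int)) (e : Int) : Int :=
  if h : K S e < S.length then (S[K S e]).2 else -1

lemma before_eq :
    (fun a b : Int × Int => decide (a.1 < b.1) || (!decide (b.1 < a.1) && decide (a.2 < b.2)))
      = (fun a b : Int × Int => decide (toLex a < toLex b)) := by
  funext a b
  by_cases h1 : a.1 < b.1 <;> by_cases h2 : b.1 < a.1 <;> by_cases h3 : a.2 < b.2 <;>
    simp [h1, h2, h3, Prod.Lex.lt_iff] <;> omega

lemma sorted2_eq_sorted_lex (xs : List (Int × Int)) :
    PySem.List.sorted2 xs (·.1) (·.2) = PySem.List.sorted xs (fun p => toLex p) := by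
  simp only [PySem.List.sorted2, PySem.List.sorted, Bool.false_eq_true, if_false]
  rw [before_eq]

lemma sorted2_fst_pairwise (xs : List (Int × Int)) :
    (PySem.List.sorted2 xs (·.1) (·.2)).Pairwise (fun a b => a.1 ≤ b.1) := by
  rw [sorted2_eq_sorted_lex]
  refine (PySem.List.sorted_pairwise xs (fun p => toLex p)).imp ?_
  intro a b h
  rcases Prod.Lex.le_iff.mp h with h | ⟨h, _⟩
  · exact le_of_lt h
  · exact le_of_eq h

lemma K_le_length (S : List (Int × Int)) (e : Int) : K S e ≤ S.length :=
  List.findIdx_le_length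

lemma K_fail {S : List (Int × Int)} {e : Int} {j : Nat} (hj : j < S.length)
    (h : j < K S e) : (S[j]).1 < e := by
  unfold K at h
  have := List.not_of_lt_findIdx h
  simpa using this

lemma K_hit {S : List (Int × Int)} {e : Int} (h : K S e < S.length) :
    e ≤ (S[K S e]).1 := by
  unfold K at h
  have := List.findIdx_getElem (w := h)
  simpa [K] using this

lemma K_mono (S : List (Int × Int)) {e e' : Int} (h : e ≤ e') : K S e ≤ K S e' := by
  by_contra h'
  simp only [not_le] at h'
  have hlt : K S e' < S.length := lt_of_lt_of_le h' (K_le_length S e)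
  have h1 := K_hit hlt
  have h2 := K_fail hlt h'
  omega

lemma advanceB_eq (S : List (Int × Int)) (e : Int) :
    ∀ p, p ≤ K S e → advanceB S e p = K S e := by
  suffices h : ∀ m p, S.length - p ≤ m → p ≤ K S e → advanceB S e p = K S e from
    fun p hp => h (S.length - p) p le_rfl hp
  intro m
  induction m with
  | zero =>
    intro p h0 hp
    rw [advanceB, dif_neg (by omega)]
    have := K_le_length S e
    omega
  | succ m ih =>
    intro p hm hp
    rw [advanceB]
    by_cases hlen : p < S.length
    · rw [dif_pos hlen]
      by_cases hc : (S[p]).1 < e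
      · rw [if_pos hc]
        have hpK : p < K S e := by
          rcases lt_or_eq_of_le hp with h | h
          · exact h
          · subst h; exact absurd (K_hit hlen) (by omega)
        exact ih (p + 1) (by omega) (by omega)
      · rw [if_neg hc]
        rcases lt_or_eq_of_le hp with h | h
        · exact absurd (K_fail hlen h) hc
        · exact h
    · rw [dif_neg hlen]
      have := K_le_length S e
      omega

lemma bsearchA_step (S : List (Int × Int)) (e left right index : Int) (h : left ≤ right) :
    bsearchA S e left right index =
      (if e ≤ (PySem.List.pyGetD S (PySem.Int.floordiv (left + right) 2) (0, 0)).1 then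
        bsearchA S e left (PySem.Int.floordiv (left + right) 2 - 1)
          (PySem.List.pyGetD S (PySem.Int.floordiv (left + right) 2) (0, 0)).2
      else bsearchA S e (PySem.Int.floordiv (left + right) 2 + 1) right index) := by
  rw [bsearchA, dif_pos h]

lemma bsearchA_eq (S : List (Int × Int)) (e : Int)
    (hmono : ∀ i j : Nat, (hij : i ≤ j) → (hj : j < S.length) → (S[i]'(by omega)).1 ≤ (S[j]).1) :
    ∀ m (left right index : Int), (right + 1 - left).toNat ≤ m →
      0 ≤ left → right ≤ (S.length : Int) - 1 →
      left ≤ (K S e : Int) → (K S e : Int) ≤ right + 1 →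
      (right < (K S e : Int) → index = fval S e) →
      bsearchA S e left right index = fval S e := by
  intro m
  induction m with
  | zero =>
    intro left right index hm h0 hr hlK hKr hidx
    rw [bsearchA, dif_neg (by omega)]
    exact hidx (by omega)
  | succ m ih =>
    intro left right index hm h0 hr hlK hKr hidx
    by_cases hlr : left ≤ right
    · rw [bsearchA_step S e left right index hlr]
      have hb := PySem.Int.floordiv_two_mid_bounds hlr
      set mid := PySem.Int.floordiv (left + right) 2 with hmid
      have hmid0 : 0 ≤ mid := by omega
      have hmidlen : mid < (S.length : Int) := by omega
      have hmn : mid.toNat < S.length := by omega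
      have hget : PySem.List.pyGetD S mid (0, 0) = S[mid.toNat] :=
        PySem.List.pyGetD_eq_getElem S (0, 0) hmid0 hmidlen
      rw [hget]
      by_cases hc : e ≤ (S[mid.toNat]).1
      · rw [if_pos hc]
        have hKmid : K S e ≤ mid.toNat := by
          by_contra hcc
          simp only [not_le] at hcc
          have := K_fail hmn hcc
          omega
        apply ih _ _ _ (by omega) h0 (by omega) hlK (by omega)
        intro hlt
        have hKeq : K S e = mid.toNat := by omega
        rw [fval, dif_pos (show K S e < S.length by omega)]
        simp [hKeq]
      · rw [if_neg hc]
        have hmidK : mid.toNat < K S e := by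
          by_contra hcc
          simp only [not_lt] at hcc
          have hKlt : K S e < S.length := lt_of_le_of_lt hcc hmn
          have := hmono (K S e) mid.toNat hcc hmn
          have := K_hit hKlt
          omega
        exact ih _ _ _ (by omega) (by omega) hr (by omega) hKr hidx
    · rw [bsearchA, dif_neg hlr]
      exact hidx (by omega)

lemma startsOf_mono (arr : List (List Int)) :
    ∀ i j : Nat, (hij : i ≤ j) → (hj : j < (startsOf arr).length) →
      ((startsOf arr)[i]'(Nat.lt_of_le_of_lt hij hj)).1 ≤ ((startsOf arr)[j]).1 := by
  intro i j hij hj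
  rcases eq_or_lt_of_le hij with h | h
  · subst h; exact le_rfl
  · exact (List.pairwise_iff_getElem.mp (sorted2_fst_pairwise _)) i j (Nat.lt_trans h hj) hj h

lemma solutionA_map (arr : List (List Int)) :
    solution arr = arr.map (fun iv => fval (startsOf arr) (PySem.List.pyGetD iv 1 0)) := by
  show arr.foldl (fun res interval =>
      res ++ [bsearchA (startsOf arr) (PySem.List.pyGetD interval 1 0) 0
        (((startsOf arr).length : Int) - 1) (-1)]) [] = _
  rw [PySem.List.foldl_append_singleton_eq_map]
  rw [List.nil_append]
  apply List.map_congr_left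
  intro iv _
  set S := startsOf arr with hSdef
  set e := PySem.List.pyGetD iv 1 0
  apply bsearchA_eq S e (by rw [hSdef]; exact startsOf_mono arr)
      ((S.length : Int) - 1 + 1 - 0).toNat 0 ((S.length : Int) - 1) (-1)
      le_rfl le_rfl le_rfl (by omega)
  · have := K_le_length S e; omega
  · intro hlt
    have hKlen := K_le_length S e
    rw [fval, dif_neg (by omega)]

-- the pointer sweep computes, per query, the same set-update as the direct fold over fval
lemma sweep_eq (S : List (Int × Int)) :
    ∀ (q : List (Int × Int)) (p : Nat) (res : List Int),
      q.Pairwise (fun a b => a.1 ≤ b.1) → (∀ pr ∈ q, p ≤ K S pr.1) →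
      (q.foldl (fun st pr =>
          let p' := advanceB S pr.1 st.1
          if h : p' < S.length then (p', st.2.set pr.2.toNat (S[p']).2) else (p', st.2))
        (p, res)).2
      = q.foldl (fun r pr =>
          if h : K S pr.1 < S.length then r.set pr.2.toNat (S[K S pr.1]).2 else r) res := by
  intro q
  induction q with
  | nil => intro p res _ _; rfl
  | cons pr q ih =>
    intro p res hpw hp
    simp only [List.foldl_cons]
    have hadv : advanceB S pr.1 p = K S pr.1 := advanceB_eq S pr.1 p (hp pr (by simp))
    have hpw' := (List.pairwise_cons.mp hpw).2
    have hhead := (List.pairwise_cons.mp hpw).1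
    have hnext : ∀ pr' ∈ q, K S pr.1 ≤ K S pr'.1 := fun pr' h => K_mono S (hhead pr' h)
    by_cases h : K S pr.1 < S.length
    · simp only [hadv, dif_pos h]
      exact ih (K S pr.1) _ hpw' hnext
    · simp only [hadv, dif_neg h]
      exact ih (K S pr.1) _ hpw' hnext

lemma fold_length (S : List (Int × Int)) :
    ∀ (q : List (Int × Int)) (res : List Int),
      (q.foldl (fun r pr =>
          if h : K S pr.1 < S.length then r.set pr.2.toNat (S[K S pr.1]).2 else r) res).length
        = res.length := by
  intro q
  induction q with
  | nil => intro res; rfl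
  | cons pr q ih =>
    intro res
    simp only [List.foldl_cons]
    rw [ih]
    split <;> simp

lemma eval_fold (S : List (Int × Int)) (n : Nat) (endF : Nat → Int) :
    ∀ (q : List (Int × Int)) (res : List Int) (hlen : res.length = n)
      (hres : ∀ j (hj : j < n), res[j]'(by omega) = -1 ∨ res[j]'(by omega) = fval S (endF j))
      (hq : ∀ pr ∈ q, ∃ m : Nat, m < n ∧ pr.2 = (m : Int) ∧ pr.1 = endF m)
      (i : Nat) (hi : i < n)
      (hfi : i < (q.foldl (fun r pr =>
          if h : K S pr.1 < S.length then r.set pr.2.toNat (S[K S pr.1]).2 else r) res).length),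
      ((q.foldl (fun r pr =>
          if h : K S pr.1 < S.length then r.set pr.2.toNat (S[K S pr.1]).2 else r) res)[i]'hfi)
        = if (i : Int) ∈ q.map Prod.snd then fval S (endF i) else res[i]'(by omega) := by
  intro q
  induction q with
  | nil =>
    intro res hlen hres hq i hi hfi
    simp
  | cons pr q ih =>
    intro res hlen hres hq i hi hfi
    rw [fold_length] at hfi
    obtain ⟨m, hm, hsnd, hfst⟩ := hq pr (List.mem_cons_self)
    have htn : pr.2.toNat = m := by omega
    have hq' : ∀ pr' ∈ q, ∃ m : Nat, m < n ∧ pr'.2 = (m : Int) ∧ pr'.1 = endF m :=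
      fun pr' h => hq pr' (List.mem_cons_of_mem _ h)
    simp only [List.foldl_cons]
    by_cases h : K S pr.1 < S.length
    · simp only [dif_pos h]
      have hlen1 : (res.set pr.2.toNat (S[K S pr.1]).2).length = n := by
        simp [hlen]
      have hres1 : ∀ j (hj : j < n),
          (res.set pr.2.toNat (S[K S pr.1]).2)[j]'(by simp only [List.length_set]; omega) = -1 ∨
          (res.set pr.2.toNat (S[K S pr.1]).2)[j]'(by simp only [List.length_set]; omega)
            = fval S (endF j) := by
        intro j hj
        rw [List.getElem_set]
        by_cases hjm : pr.2.toNat = j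
        · rw [if_pos hjm]
          right
          have hmj : j = m := by omega
          subst hmj
          rw [← hfst, fval, dif_pos h]
        · rw [if_neg hjm]
          exact hres j hj
      rw [ih _ hlen1 hres1 hq' i hi (by rw [fold_length]; omega)]
      by_cases hin : (i : Int) ∈ q.map Prod.snd
      · rw [if_pos hin, if_pos (by simp [hin])]
      · rw [if_neg hin]
        by_cases him : pr.2 = (i : Int)
        · rw [if_pos (by simp [him])]
          have hmi : m = i := by omega
          subst hmi
          rw [List.getElem_set, if_pos (by omega)]
          rw [← hfst, fval, dif_pos h]
        · rw [if_neg (by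
            simp only [List.map_cons, List.mem_cons]
            rintro (hh | hh)
            · exact him hh.symm
            · exact hin hh)]
          rw [List.getElem_set, if_neg (by omega)]
    · simp only [dif_neg h]
      rw [ih _ hlen hres hq' i hi (by rw [fold_length]; omega)]
      by_cases hin : (i : Int) ∈ q.map Prod.snd
      · rw [if_pos hin, if_pos (by simp [hin])]
      · rw [if_neg hin]
        by_cases him : pr.2 = (i : Int)
        · rw [if_pos (by simp [him])]
          have hmi : m = i := by omega
          subst hmi
          have hf : fval S (endF m) = -1 := by
            rw [fval, dif_neg (by rw [← hfst]; exact h)]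
          rcases hres m hi with h' | h'
          · rw [h', hf]
          · exact h'
        · rw [if_neg (by
            simp only [List.map_cons, List.mem_cons]
            rintro (hh | hh)
            · exact him hh.symm
            · exact hin hh)]

lemma endsOf_mem (arr : List (List Int)) :
    ∀ pr ∈ endsOf arr, ∃ m : Nat, m < arr.length ∧ pr.2 = (m : Int) ∧
      pr.1 = PySem.List.pyGetD (arr.getD m []) 1 0 := by
  intro pr hpr
  have hperm := PySem.List.sorted2_perm
    (arr.zipIdx.map (fun p => (PySem.List.pyGetD p.1 1 0, (p.2 : Int)))) (·.1) (·.2) false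
  have hmem := hperm.mem_iff.mp hpr
  obtain ⟨⟨x, i⟩, hxi, heq⟩ := List.mem_map.mp hmem
  obtain ⟨_, hi, hx⟩ := List.mem_zipIdx hxi
  simp only [Nat.sub_zero] at hx
  refine ⟨i, by omega, by rw [← heq], ?_⟩
  rw [← heq]
  show PySem.List.pyGetD x 1 0 = _
  rw [hx, List.getD_eq_getElem arr [] (by omega)]

lemma endsOf_cover (arr : List (List Int)) :
    ∀ i : Nat, i < arr.length → (i : Int) ∈ (endsOf arr).map Prod.snd := by
  intro i hi
  have hperm := PySem.List.sorted2_perm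
    (arr.zipIdx.map (fun p => (PySem.List.pyGetD p.1 1 0, (p.2 : Int)))) (·.1) (·.2) false
  apply List.mem_map.mpr
  refine ⟨(PySem.List.pyGetD (arr[i]) 1 0, (i : Int)), ?_, rfl⟩
  apply hperm.mem_iff.mpr
  apply List.mem_map.mpr
  refine ⟨(arr[i], i), ?_, rfl⟩
  rw [List.mem_zipIdx_iff_getElem?]
  simp [hi]

lemma solutionB_map (arr : List (List Int)) :
    solution_alt arr = arr.map (fun iv => fval (startsOf arr) (PySem.List.pyGetD iv 1 0)) := by
  have hsweep := sweep_eq (startsOf arr) (endsOf arr) 0 (List.replicate arr.length (-1 : Int))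
    (sorted2_fst_pairwise _) (fun pr _ => Nat.zero_le _)
  show ((endsOf arr).foldl (fun st pr =>
      let p := advanceB (startsOf arr) pr.1 st.1
      if h : p < (startsOf arr).length then (p, st.2.set pr.2.toNat ((startsOf arr)[p]).2)
      else (p, st.2))
    ((0 : Nat), List.replicate arr.length (-1 : Int))).2 = _
  rw [hsweep]
  apply List.ext_getElem
  · rw [fold_length]
    simp
  · intro i hi hi2
    have hin : i < arr.length := by simpa using hi2
    have he := eval_fold (startsOf arr) arr.length
      (fun m => PySem.List.pyGetD (arr.getD m []) 1 0) (endsOf arr)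
      (List.replicate arr.length (-1 : Int)) (by simp)
      (fun j hj => Or.inl (by simp)) (endsOf_mem arr) i hin
      (by rw [fold_length]; simpa using hin)
    rw [if_pos (endsOf_cover arr i hin)] at he
    rw [List.getElem_map]
    exact he.trans (by simp [List.getElem?_eq_getElem hin])

-- ===== VERDICT (by name: the statement is the Claim_ definition above) =====
theorem solution_spec : Claim_equal_solution := by
  intro arr _ _
  show solution arr = solution_alt arr
  rw [solutionA_map, solutionB_map]
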